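-- pv_equiv track=rewrite | github.com/sudiptarafdar7-spec/PHD-Capital-Rationale-Studio-Ready | backend/pipeline/bulk/step02_convert_csv.py | parse_bulk_input
-- ===== SOURCE A (Python) =====
-- def parse_bulk_input(input_text):
--     """
--     Parse the bulk input text line by line.
--     Format: Stock name line, then analysis line(s), then empty line, repeat.
--
--     Returns list of tuples: [(stock_names_string, analysis_text), ...]
--     """
--     lines = input_text.strip().split('\n')
--     entries = []
--
--     i = 0
--     while i < len(lines):
--         line = lines[i].strip()
--
--         if not line:
--             i += 1
--             continue
--
--         stock_line = line
--
--         analysis_lines = []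
--         i += 1
--         while i < len(lines):
--             next_line = lines[i].strip()
--
--             if not next_line:
--                 i += 1
--                 if i < len(lines) and lines[i].strip():
--                     next_peek = lines[i].strip()
--                     if len(next_peek) < 100 and not any(c in next_peek.lower() for c in ['should', 'can', 'will', 'the', 'is', 'are', 'has', 'have', 'target', 'stop', 'hold', 'buy', 'sell', 'trading']):
--                         break
--                 break
--
--             analysis_lines.append(next_line)
--             i += 1
--
--         analysis_text = ' '.join(analysis_lines)
--
--         if analysis_text:
--             entries.append((stock_line, analysis_text))
--
--     return entries
-- ===== SOURCE B (Python) =====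
-- def parse_bulk_input(input_text):
--     """Group the stripped lines into maximal runs of non-empty lines; each run's
--     first line is the stock line, the rest joined by spaces is the analysis."""
--     groups = []
--     current = []
--     for raw in input_text.strip().split('\n'):
--         line = raw.strip()
--         if line:
--             current.append(line)
--         elif current:
--             groups.append(current)
--             current = []
--     if current:
--         groups.append(current)
--     return [(g[0], ' '.join(g[1:])) for g in groups if len(g) > 1]
-- ===== Notes on version B (the rewrite author's own statement) =====
-- stated objective: simpler
-- what changed: Replaced the index-driven while loops with their dead peek/keyword heuristic (inert: on a blank line both branches break identically) by a single pass that groups stripped lines into runs of non-empty lines and emits (first line, join of rest) for runs of length > 1.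
import Mathlib
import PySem

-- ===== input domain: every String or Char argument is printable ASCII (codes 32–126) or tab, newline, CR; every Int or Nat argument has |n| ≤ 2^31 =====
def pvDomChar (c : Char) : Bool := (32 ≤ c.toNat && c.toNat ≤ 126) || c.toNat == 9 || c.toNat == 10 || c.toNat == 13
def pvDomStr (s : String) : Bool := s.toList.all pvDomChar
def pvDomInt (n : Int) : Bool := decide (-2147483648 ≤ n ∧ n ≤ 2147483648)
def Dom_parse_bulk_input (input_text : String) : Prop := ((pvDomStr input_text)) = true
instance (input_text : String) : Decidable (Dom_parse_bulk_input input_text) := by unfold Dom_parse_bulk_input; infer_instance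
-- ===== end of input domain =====

-- B replaces A's index bookkeeping (whose peek/keyword check is inert: both branches break) by one
-- grouping pass over the stripped lines; objective: simpler.

-- ===== PORT A =====
-- the keyword list of A's (inert) peek heuristic
def pvKeywords : List String :=
  ["should", "can", "will", "the", "is", "are", "has", "have", "target", "stop", "hold", "buy", "sell", "trading"]

-- inner while loop of A: collects stripped analysis lines until a blank line (consumed) or end;
-- returns (analysis_lines, remaining lines after the loop)
def pvInner : List String → List String × List String
  | [] => ([], [])
  | x :: xs =>
    let next_line := PySem.Str.strip x
    if next_line = "" then
      -- i += 1; then the peek check, whose every branch breaks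
      match xs with
      | y :: _ =>
        if PySem.Str.strip y ≠ "" then
          let next_peek := PySem.Str.strip y
          if PySem.Str.len next_peek < 100 ∧
              ¬ (pvKeywords.any (fun c => PySem.Str.isIn c (PySem.Str.lower next_peek))) then
            ([], xs)  -- break
          else
            ([], xs)  -- break
        else
          ([], xs)  -- break
      | [] => ([], xs)  -- break
    else
      let r := pvInner xs
      (next_line :: r.1, r.2)

theorem pvInner_len_le : ∀ xs : List String, (pvInner xs).2.length ≤ xs.length := by
  intro xs
  induction xs with
  | nil => simp [pvInner]
  | cons x xs ih =>
    simp only [pvInner]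
    split
    · cases xs with
      | nil => simp
      | cons y ys => split <;> first | (split <;> simp) | simp
    · simpa using Nat.le_succ_of_le ih

-- outer while loop of A
def pvOuter : List String → List (String × String)
  | [] => []
  | l :: rest =>
    let line := PySem.Str.strip l
    if line = "" then
      pvOuter rest
    else
      let stock_line := line
      let r := pvInner rest
      let analysis_text := PySem.Str.join " " r.1
      if analysis_text = "" then
        pvOuter r.2
      else
        (stock_line, analysis_text) :: pvOuter r.2
  termination_by lines => lines.length
  decreasing_by all_goals simp only [List.length_cons]; all_goals first
    | omega
    | exact Nat.lt_succ_of_le (pvInner_len_le rest)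

-- split? with the non-empty separator "\n" always returns some
def parse_bulk_input (input_text : String) : List (String × String) :=
  pvOuter ((PySem.Str.split? (PySem.Str.strip input_text) "\n").getD [])

-- ===== PORT B =====
-- one fold step: append the stripped line to the current run, or flush the run on a blank line
def pvStep (st : List (List String) × List String) (raw : String) : List (List String) × List String :=
  let line := PySem.Str.strip raw
  if line ≠ "" then
    (st.1, st.2 ++ [line])
  else if st.2 ≠ [] then
    (st.1 ++ [st.2], [])
  else
    st

def parse_bulk_input_alt (input_text : String) : List (String × String) :=
  let st : List (List String) × List String :=
    (((PySem.Str.split? (PySem.Str.strip input_text) "\n").getD []) : List String).foldl pvStep ([], [])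
  let groups := if st.2 ≠ [] then st.1 ++ [st.2] else st.1
  groups.filterMap (fun (g : List String) =>
    if g.length > 1 then some (g.headI, PySem.Str.join " " g.tail) else none)

-- ===== PRECONDITION & SPEC =====
def Spec_parse_bulk_input (input_text : String) (out : List (String × String)) : Prop := out = parse_bulk_input_alt input_text
instance (input_text : String) (out : List (String × String)) : Decidable (Spec_parse_bulk_input input_text out) := by unfold Spec_parse_bulk_input; infer_instance

-- ===== CLAIM (what is proved, stated in full; the proofs are below) =====
def Claim_equal_parse_bulk_input : Prop := ∀ (input_text : String), Dom_parse_bulk_input input_text → Spec_parse_bulk_input input_text (parse_bulk_input input_text)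

-- ===== LEMMAS AND PROOFS =====

-- proof-side: the groups A's two loops effectively produce
def pvGather : List String → List (List String)
  | [] => []
  | l :: rest =>
    let line := PySem.Str.strip l
    if line = "" then
      pvGather rest
    else
      (line :: (pvInner rest).1) :: pvGather (pvInner rest).2
  termination_by lines => lines.length
  decreasing_by all_goals simp only [List.length_cons]; all_goals first
    | omega
    | exact Nat.lt_succ_of_le (pvInner_len_le rest)

-- finalize B's fold state into the group list
def pvFinal (st : List (List String) × List String) : List (List String) :=
  if st.2 ≠ [] then st.1 ++ [st.2] else st.1

theorem pvInner_blank (x : String) (xs : List String) (h : PySem.Str.strip x = "") :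
    pvInner (x :: xs) = ([], xs) := by
  cases xs <;> simp [pvInner, h]

theorem pvInner_nonblank (x : String) (xs : List String) (h : ¬ PySem.Str.strip x = "") :
    pvInner (x :: xs) = (PySem.Str.strip x :: (pvInner xs).1, (pvInner xs).2) := by
  simp [pvInner, h]

theorem pvInner_fst_ne : ∀ xs : List String, ∀ y ∈ (pvInner xs).1, y ≠ "" := by
  intro xs
  induction xs with
  | nil => simp [pvInner]
  | cons x xs ih =>
    by_cases h : PySem.Str.strip x = ""
    · rw [pvInner_blank x xs h]; simp
    · rw [pvInner_nonblank x xs h]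
      intro y hy
      rcases List.mem_cons.mp hy with rfl | hy
      · exact h
      · exact ih y hy

theorem pvJoin_cons_ne (x : String) (xs : List String) (hx : x ≠ "") :
    PySem.Str.join " " (x :: xs) ≠ "" := by
  intro hj
  have hl : (PySem.Str.join " " (x :: xs)).toList = [] := by rw [hj]; rfl
  rw [PySem.Str.toList_join] at hl
  cases xs with
  | nil =>
    rw [List.map_cons, List.map_nil, PySem.Chars.join_singleton] at hl
    exact hx (String.toList_eq_nil_iff.mp hl)
  | cons y ys =>
    rw [List.map_cons, List.map_cons, PySem.Chars.join_cons_cons] at hl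
    simp at hl

theorem pvFoldl_prefix : ∀ (lines : List String) (groups : List (List String)) (cur : List String),
    lines.foldl pvStep (groups, cur) =
      (groups ++ (lines.foldl pvStep ([], cur)).1, (lines.foldl pvStep ([], cur)).2) := by
  intro lines
  induction lines with
  | nil => simp
  | cons l rest ih =>
    intro groups cur
    simp only [List.foldl_cons]
    by_cases h : PySem.Str.strip l = ""
    · by_cases hc : cur = []
      · subst hc
        simp only [pvStep, h]
        simpa using ih groups []
      · simp only [pvStep, h]
        simp only [ne_eq, not_true_eq_false, if_false, if_pos hc, List.nil_append]
        rw [ih (groups ++ [cur]) [], ih [cur] []]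
        simp
    · simp only [pvStep, ne_eq, h, not_false_eq_true, if_pos]
      exact ih groups (cur ++ [PySem.Str.strip l])

theorem pvFinal_append (g : List (List String)) (st : List (List String) × List String) :
    pvFinal (g ++ st.1, st.2) = g ++ pvFinal st := by
  unfold pvFinal
  split <;> simp

theorem pvMain : ∀ (n : Nat) (lines : List String), lines.length ≤ n →
    pvFinal (lines.foldl pvStep ([], [])) = pvGather lines ∧
    ∀ cur : List String, cur ≠ [] →
      pvFinal (lines.foldl pvStep ([], cur)) =
        (cur ++ (pvInner lines).1) :: pvGather ((pvInner lines).2) := by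
  intro n
  induction n with
  | zero =>
    intro lines hl
    rw [List.length_eq_zero_iff.mp (Nat.le_zero.mp hl)]
    refine ⟨by simp [pvFinal, pvGather], ?_⟩
    intro cur hc
    simp [pvFinal, pvGather, pvInner, hc]
  | succ n ih =>
    intro lines hl
    cases lines with
    | nil =>
      refine ⟨by simp [pvFinal, pvGather], ?_⟩
      intro cur hc
      simp [pvFinal, pvGather, pvInner, hc]
    | cons l rest =>
      have hr : rest.length ≤ n := by simpa using hl
      by_cases h : PySem.Str.strip l = ""
      · constructor
        · simp only [List.foldl_cons, pvStep, h, ne_eq, not_true_eq_false, if_false]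
          rw [(ih rest hr).1]
          conv_rhs => rw [pvGather]
          simp [h]
        · intro cur hc
          simp only [List.foldl_cons, pvStep, h, ne_eq, not_true_eq_false, if_false,
            if_pos hc, List.nil_append]
          rw [pvFoldl_prefix rest [cur] [],
            show ([cur] ++ (List.foldl pvStep ([], []) rest).1, (List.foldl pvStep ([], []) rest).2)
              = ([cur] ++ (List.foldl pvStep ([], []) rest).1,
                 (([] : List (List String)) ++ (List.foldl pvStep ([], []) rest).1,
                  (List.foldl pvStep ([], []) rest).2).2) from by simp,
            pvFinal_append [cur] (List.foldl pvStep ([], []) rest)]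
          rw [(ih rest hr).1, pvInner_blank l rest h]
          simp
      · constructor
        · simp only [List.foldl_cons, pvStep, ne_eq, h, not_false_eq_true, if_pos,
            List.nil_append]
          rw [((ih rest hr).2 [PySem.Str.strip l] (by simp))]
          conv_rhs => rw [pvGather]
          simp [h]
        · intro cur hc
          simp only [List.foldl_cons, pvStep, ne_eq, h, not_false_eq_true, if_pos]
          rw [((ih rest hr).2 (cur ++ [PySem.Str.strip l]) (by simp))]
          rw [pvInner_nonblank l rest h]
          simp


theorem pvGather_eq_fold : ∀ lines : List String,
    (if (lines.foldl pvStep ([], [])).2 ≠ [] then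
      (lines.foldl pvStep ([], [])).1 ++ [(lines.foldl pvStep ([], [])).2]
     else (lines.foldl pvStep ([], [])).1) = pvGather lines := by
  intro lines
  exact (pvMain lines.length lines le_rfl).1

theorem pvOuter_eq_filterMap : ∀ lines : List String,
    pvOuter lines = (pvGather lines).filterMap (fun (g : List String) =>
      if g.length > 1 then some (g.headI, PySem.Str.join " " g.tail) else none) := by
  suffices h : ∀ (n : Nat) (lines : List String), lines.length ≤ n →
      pvOuter lines = (pvGather lines).filterMap (fun (g : List String) =>
        if g.length > 1 then some (g.headI, PySem.Str.join " " g.tail) else none) by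
    intro lines; exact h lines.length lines le_rfl
  intro n
  induction n with
  | zero =>
    intro lines hl
    rw [List.length_eq_zero_iff.mp (Nat.le_zero.mp hl)]
    simp [pvOuter, pvGather]
  | succ n ih =>
    intro lines hl
    cases lines with
    | nil => simp [pvOuter, pvGather]
    | cons l rest =>
      have hr : rest.length ≤ n := by simpa using hl
      rw [pvOuter, pvGather]
      by_cases h : PySem.Str.strip l = ""
      · simpa [h] using ih rest hr
      · have h2 : (pvInner rest).2.length ≤ n := le_trans (pvInner_len_le rest) hr
        cases ha : (pvInner rest).1 with
        | nil =>
          have hj : PySem.Str.join " " (pvInner rest).1 = "" := by rw [ha]; rfl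
          simp only [h, ite_false, List.filterMap_cons, ha,
            List.length_cons, List.length_nil]
          simpa using ih (pvInner rest).2 h2
        | cons x xs =>
          have hx : x ≠ "" := pvInner_fst_ne rest x (by rw [ha]; exact List.mem_cons_self)
          have hj : PySem.Str.join " " (x :: xs) ≠ "" := pvJoin_cons_ne x xs hx
          simp only [h, ite_false, List.filterMap_cons, ha, List.length_cons]
          rw [if_neg hj, ih (pvInner rest).2 h2]
          simp

-- ===== VERDICT (by name: the statement is the Claim_ definition above) =====
theorem parse_bulk_input_spec : Claim_equal_parse_bulk_input := by
  intro input_text _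
  unfold Spec_parse_bulk_input parse_bulk_input parse_bulk_input_alt
  simp only [pvOuter_eq_filterMap, pvGather_eq_fold]
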